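-- pv_equiv track=rewrite | github.com/Mikosztyla/UniversityProgramms | Arrays/16_min_and_max.py | is_uniq
-- ===== SOURCE A (Python) =====
-- def is_uniq(tab):
--     minim = maxim = tab[0]
--     min_count = max_count = 1
--     for i in range(1, len(tab)):
--         if tab[i] >= maxim:
--             if tab[i] == maxim:
--                 max_count += 1
--             else:
--                 maxim = tab[i]
--                 max_count = 1
--         elif tab[i] <= minim:
--             if tab[i] == minim:
--                 min_count += 1
--             else:
--                 minim = tab[i]
--                 min_count = 1
--     if max_count > 1 or min_count > 1:
--         return False
--     return True
-- ===== SOURCE B (Python) =====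
-- def is_uniq(tab):
--     mn = mx = tab[0]
--     for x in tab[1:]:
--         if x < mn:
--             mn = x
--         if x > mx:
--             mx = x
--     return tab.count(mn) == 1 and tab.count(mx) == 1
-- ===== Notes on version B (the rewrite author's own statement) =====
-- stated objective: simpler
-- what changed: Replaces A's fused single pass that maintains running min/max together with their occurrence counters by a plain 'find min and max, then count their occurrences with list.count' multi-pass shape.
-- intended difference: On lists whose minimum occurs only as a repeated initial constant run followed solely by strictly larger elements with a unique maximum (e.g. [2,2,3]), A returns True because the early duplicates of the minimum are credited to max_count and forgotten when a larger element arrives, while B returns False, the intended answer since the minimum is not unique. — e.g. on is_uniq([2, 2, 3]): A returns true, B returns false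
import Mathlib
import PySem

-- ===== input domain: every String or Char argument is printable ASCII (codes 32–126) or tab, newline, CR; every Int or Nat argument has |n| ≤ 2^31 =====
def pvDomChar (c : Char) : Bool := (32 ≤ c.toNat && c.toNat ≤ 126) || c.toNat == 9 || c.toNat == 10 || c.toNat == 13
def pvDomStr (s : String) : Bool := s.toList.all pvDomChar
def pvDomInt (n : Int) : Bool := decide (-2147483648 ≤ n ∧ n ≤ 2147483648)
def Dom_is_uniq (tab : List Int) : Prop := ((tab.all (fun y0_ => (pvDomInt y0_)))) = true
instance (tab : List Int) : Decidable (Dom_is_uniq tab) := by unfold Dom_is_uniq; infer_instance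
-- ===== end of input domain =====

-- B finds min and max first and then counts each with list.count, instead of A's fused
-- single pass maintaining min/max with occurrence counters; B fixes A's undercount of
-- early duplicates of the minimum (stated as the intended difference D_ below).

-- ===== PORT A =====
-- state: (minim, maxim, min_count, max_count)
def is_uniq (tab : List Int) : Bool :=
  match tab with
  | [] => true   -- unreachable: A raises IndexError on []; excluded by Pre_is_uniq
  | h :: t =>
    let s := t.foldl (fun (st : Int × Int × Int × Int) x =>
      if x ≥ st.2.1 then
        if x = st.2.1 then (st.1, st.2.1, st.2.2.1, st.2.2.2 + 1)
        else (st.1, x, st.2.2.1, 1)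
      else if x ≤ st.1 then
        if x = st.1 then (st.1, st.2.1, st.2.2.1 + 1, st.2.2.2)
        else (x, st.2.1, 1, st.2.2.2)
      else st) (h, h, 1, 1)
    if s.2.2.2 > 1 ∨ s.2.2.1 > 1 then false else true

-- ===== PORT B =====
def is_uniq_alt (tab : List Int) : Bool :=
  match tab with
  | [] => true   -- unreachable: B raises IndexError on []; excluded by Pre_is_uniq
  | h :: t =>
    let p := t.foldl (fun (st : Int × Int) x =>
      ((if x < st.1 then x else st.1), (if x > st.2 then x else st.2))) (h, h)
    decide (PySem.List.count tab p.1 = 1) && decide (PySem.List.count tab p.2 = 1)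

-- ===== PRECONDITION & SPEC =====
-- Pre_ excludes only the empty list, on which both A and B raise IndexError (tab[0]).
def Pre_is_uniq (tab : List Int) : Prop := tab ≠ []
instance (tab : List Int) : Decidable (Pre_is_uniq tab) := by unfold Pre_is_uniq; infer_instance
def pvWitness_is_uniq : List Int := [1, 2, 3]

-- On lists whose minimum occurs only as a repeated initial constant run followed solely by
-- strictly larger elements with a unique maximum (e.g. [2,2,3]), A returns True because the
-- early duplicates of the minimum were credited to max_count and are forgotten when a larger
-- element arrives, while B returns False — the intended answer, the minimum is not unique.
def D_is_uniq (tab : List Int) : Prop :=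
  ∀ m ∈ tab.min?, 2 ≤ tab.count m ∧ tab.count m ≤ (tab.takeWhile (· == m)).length ∧
    ∀ M ∈ tab.max?, tab.count M = 1
instance (tab : List Int) : Decidable (D_is_uniq tab) := by
  unfold D_is_uniq; infer_instance

def Spec_is_uniq (tab : List Int) (out : Bool) : Prop := ¬ D_is_uniq tab → out = is_uniq_alt tab
instance (tab : List Int) (out : Bool) : Decidable (Spec_is_uniq tab out) := by unfold Spec_is_uniq; infer_instance

def pvDiffWitness_is_uniq : List Int := [2, 2, 3]
def pvDiffWitnessOut_is_uniq : Bool × Bool := (true, false)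

-- ===== CLAIM (what is proved, stated in full; the proofs are below) =====
def Claim_unchanged_is_uniq : Prop := ∀ (tab : List Int), Dom_is_uniq tab → Pre_is_uniq tab → Spec_is_uniq tab (is_uniq tab)
def Claim_changed_is_uniq : Prop := Dom_is_uniq (pvDiffWitness_is_uniq) ∧ Pre_is_uniq (pvDiffWitness_is_uniq) ∧ D_is_uniq (pvDiffWitness_is_uniq) ∧ is_uniq (pvDiffWitness_is_uniq) = pvDiffWitnessOut_is_uniq.1 ∧ is_uniq_alt (pvDiffWitness_is_uniq) = pvDiffWitnessOut_is_uniq.2 ∧ pvDiffWitnessOut_is_uniq.1 ≠ pvDiffWitnessOut_is_uniq.2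
def Claim_exact_is_uniq : Prop := ∀ (tab : List Int), Dom_is_uniq tab → Pre_is_uniq tab → D_is_uniq tab → is_uniq tab ≠ is_uniq_alt tab

-- ===== LEMMAS AND PROOFS =====

-- A's loop body and loop state, named for the proofs (definitionally the lambdas in the ports)

def stepA (st : Int × Int × Int × Int) (x : Int) : Int × Int × Int × Int :=
  if x ≥ st.2.1 then
    if x = st.2.1 then (st.1, st.2.1, st.2.2.1, st.2.2.2 + 1)
    else (st.1, x, st.2.2.1, 1)
  else if x ≤ st.1 then
    if x = st.1 then (st.1, st.2.1, st.2.2.1 + 1, st.2.2.2)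
    else (x, st.2.1, 1, st.2.2.2)
  else st

def mcA (h : Int) (t : List Int) : Int :=
  if t.foldl min h = h then 1 + (List.count h (t.dropWhile (· == h)) : Int)
  else (List.count (t.foldl min h) (h :: t) : Int)

lemma all_eq_of_dropWhile_nil (h : Int) (l : List Int)
    (hd : l.dropWhile (· == h) = []) : ∀ y ∈ l, y = h := by
  intro y hy
  have := (List.dropWhile_eq_nil_iff).1 hd y hy
  simpa using this

lemma foldl_max_eq_of_all_eq (h : Int) (l : List Int) (hall : ∀ y ∈ l, y = h) :
    l.foldl max h = h := by
  rcases PySem.List.foldl_max_mem l h with h1 | h1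
  · exact h1
  · exact hall _ h1

lemma foldA_eq (h : Int) (t : List Int) :
    t.foldl stepA (h, h, 1, 1) =
      (t.foldl min h, t.foldl max h, mcA h t, (List.count (t.foldl max h) (h :: t) : Int)) := by
  induction t using List.reverseRecOn with
  | nil => simp [mcA]
  | append_singleton l x ih =>
    rw [List.foldl_append, List.foldl_append, List.foldl_append, ih]
    simp only [List.foldl_cons, List.foldl_nil]
    set mn := l.foldl min h with hmn
    set mx := l.foldl max h with hmx
    have hmnh : mn ≤ h := (PySem.List.foldl_min_le l h).1
    have hhmx : h ≤ mx := (PySem.List.le_foldl_max l h).1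
    have hmnle : ∀ y ∈ l, mn ≤ y := (PySem.List.foldl_min_le l h).2
    have hlemx : ∀ y ∈ l, y ≤ mx := (PySem.List.le_foldl_max l h).2
    have hmnmx : mn ≤ mx := le_trans hmnh hhmx
    have hcons : ∀ (v : Int), List.count v (h :: (l ++ [x])) = List.count v (h :: l) + List.count v [x] := by
      intro v; rw [← List.cons_append, List.count_append]
    have hcx : ∀ (v : Int), List.count v [x] = if x = v then 1 else 0 := by
      intro v; by_cases hv : x = v <;> simp [hv]
    simp only [stepA]
    split_ifs with hge heq hle heqn
    · -- x ≥ mx, x = mx : maxc + 1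
      simp only [Prod.mk.injEq]
      refine ⟨by omega, by omega, ?_, ?_⟩
      · unfold mcA
        simp only [List.foldl_append, List.foldl_cons, List.foldl_nil, ← hmn]
        have hmin' : min mn x = mn := by omega
        rw [hmin']
        by_cases hmh : mn = h
        · rw [if_pos hmh, if_pos hmh, List.dropWhile_append]
          by_cases hdw : (l.dropWhile (· == h)).isEmpty
          · rw [if_pos hdw]
            have hall := all_eq_of_dropWhile_nil h l (by simpa [List.isEmpty_iff] using hdw)
            have hmxh : mx = h := foldl_max_eq_of_all_eq h l hall
            have hxh : x = h := by omega
            rw [List.isEmpty_iff.1 hdw]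
            simp [List.dropWhile, hxh]
          · rw [if_neg hdw]
            obtain ⟨y, hyl, hyne⟩ : ∃ y ∈ l, y ≠ h := by
              by_contra hc
              push Not at hc
              exact (List.isEmpty_iff.not.1 hdw)
                ((List.dropWhile_eq_nil_iff).2 (fun y hy => by simp [hc y hy]))
            have h2 : h ≤ y := by rw [← hmh]; exact hmnle y hyl
            have h3 : y ≤ mx := hlemx y hyl
            have hxh : x ≠ h := by omega
            rw [List.count_append, hcx, if_neg hxh]
            simp
        · rw [if_neg hmh, if_neg hmh, hcons, hcx]
          have hxmn : x ≠ mn := by omega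
          rw [if_neg hxmn]
          simp
      · rw [hcons, hcx]
        have hmaxx : max mx x = mx := by omega
        rw [hmaxx, if_pos heq]
        push_cast; ring
    · -- x > mx : new max
      have hxmx : mx < x := by omega
      simp only [Prod.mk.injEq]
      refine ⟨by omega, by omega, ?_, ?_⟩
      · unfold mcA
        simp only [List.foldl_append, List.foldl_cons, List.foldl_nil, ← hmn]
        have hmin' : min mn x = mn := by omega
        rw [hmin']
        by_cases hmh : mn = h
        · rw [if_pos hmh, if_pos hmh, List.dropWhile_append]
          by_cases hdw : (l.dropWhile (· == h)).isEmpty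
          · rw [if_pos hdw]
            have hall := all_eq_of_dropWhile_nil h l (by simpa [List.isEmpty_iff] using hdw)
            have hmxh : mx = h := foldl_max_eq_of_all_eq h l hall
            have hxh : x ≠ h := by omega
            have hbeq : (x == h) = false := by simpa using hxh
            rw [List.isEmpty_iff.1 hdw]
            simp [List.dropWhile, hbeq, hcx, hxh]
          · rw [if_neg hdw, List.count_append, hcx, if_neg (by omega : ¬ x = h)]
            simp
        · rw [if_neg hmh, if_neg hmh, hcons, hcx]
          have hxmn : x ≠ mn := by omega
          rw [if_neg hxmn]
          simp
      · have hmaxx : max mx x = x := by omega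
        rw [hmaxx, hcons, hcx]
        have hnot : x ∉ (h :: l) := by
          intro hmem
          rcases List.mem_cons.1 hmem with h' | hmem'
          · omega
          · have := hlemx x hmem'; omega
        rw [List.count_eq_zero.2 hnot]
        simp
    · -- x < mx, x ≤ mn, x = mn : minc + 1
      have hxmx : x < mx := by omega
      simp only [Prod.mk.injEq]
      refine ⟨by omega, by omega, ?_, ?_⟩
      · unfold mcA
        simp only [List.foldl_append, List.foldl_cons, List.foldl_nil, ← hmn]
        have hmin' : min mn x = mn := by omega
        rw [hmin']
        by_cases hmh : mn = h
        · rw [if_pos hmh, if_pos hmh, List.dropWhile_append]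
          by_cases hdw : (l.dropWhile (· == h)).isEmpty
          · exfalso
            have hall := all_eq_of_dropWhile_nil h l (by simpa [List.isEmpty_iff] using hdw)
            have hmxh : mx = h := foldl_max_eq_of_all_eq h l hall
            omega
          · rw [if_neg hdw, List.count_append, hcx]
            have hxh : x = h := by omega
            rw [if_pos hxh]
            push_cast; ring
        · rw [if_neg hmh, if_neg hmh, hcons, hcx, if_pos heqn]
          push_cast; ring
      · have hmaxx : max mx x = mx := by omega
        rw [hmaxx, hcons, hcx, if_neg (by omega : ¬ x = mx)]
        simp
    · -- x < mn : new min
      have hxmn : x < mn := by omega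
      have hxmx : x < mx := by omega
      simp only [Prod.mk.injEq]
      refine ⟨by omega, by omega, ?_, ?_⟩
      · unfold mcA
        simp only [List.foldl_append, List.foldl_cons, List.foldl_nil, ← hmn]
        have hmin' : min mn x = x := by omega
        rw [hmin']
        have hxh : x ≠ h := by omega
        rw [if_neg hxh, hcons, hcx, if_pos rfl]
        have hnot : x ∉ (h :: l) := by
          intro hmem
          rcases List.mem_cons.1 hmem with h' | hmem'
          · omega
          · have := hmnle x hmem'; omega
        rw [List.count_eq_zero.2 hnot]
        simp
      · have hmaxx : max mx x = mx := by omega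
        rw [hmaxx, hcons, hcx, if_neg (by omega : ¬ x = mx)]
        simp
    · -- mn < x < mx : unchanged
      have hxmx : x < mx := by omega
      have hxmn : mn < x := by omega
      simp only [Prod.mk.injEq]
      refine ⟨by omega, by omega, ?_, ?_⟩
      · unfold mcA
        simp only [List.foldl_append, List.foldl_cons, List.foldl_nil, ← hmn]
        have hmin' : min mn x = mn := by omega
        rw [hmin']
        by_cases hmh : mn = h
        · rw [if_pos hmh, if_pos hmh, List.dropWhile_append]
          by_cases hdw : (l.dropWhile (· == h)).isEmpty
          · exfalso
            have hall := all_eq_of_dropWhile_nil h l (by simpa [List.isEmpty_iff] using hdw)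
            have hmxh : mx = h := foldl_max_eq_of_all_eq h l hall
            omega
          · obtain ⟨y, hyl, hyne⟩ : ∃ y ∈ l, y ≠ h := by
              by_contra hc
              push Not at hc
              exact (List.isEmpty_iff.not.1 hdw)
                ((List.dropWhile_eq_nil_iff).2 (fun y hy => by simp [hc y hy]))
            have hxh : x ≠ h := by omega
            rw [if_neg hdw, List.count_append, hcx, if_neg hxh]
            simp
        · rw [if_neg hmh, if_neg hmh, hcons, hcx, if_neg (by omega : ¬ x = mn)]
          simp
      · have hmaxx : max mx x = mx := by omega
        rw [hmaxx, hcons, hcx, if_neg (by omega : ¬ x = mx)]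
        simp


lemma foldB_gen (t : List Int) : ∀ (mn mx : Int),
    t.foldl (fun (st : Int × Int) x =>
      ((if x < st.1 then x else st.1), (if x > st.2 then x else st.2))) (mn, mx)
      = (t.foldl min mn, t.foldl max mx) := by
  induction t with
  | nil => intro mn mx; rfl
  | cons y t ih =>
    intro mn mx
    simp only [List.foldl_cons]
    rw [show ((if y < mn then y else mn), (if y > mx then y else mx)) = (min mn y, max mx y) by
      simp only [Prod.mk.injEq, min_def, max_def]; refine ⟨?_, ?_⟩ <;> split_ifs <;> omega]
    exact ih _ _

lemma is_uniq_cons (h : Int) (t : List Int) :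
    is_uniq (h :: t) =
      (if (t.foldl stepA (h, h, 1, 1)).2.2.2 > 1 ∨ (t.foldl stepA (h, h, 1, 1)).2.2.1 > 1
       then false else true) := rfl

lemma is_uniq_closed (h : Int) (t : List Int) :
    is_uniq (h :: t) =
      (if (List.count (t.foldl max h) (h :: t) : Int) > 1 ∨ mcA h t > 1 then false else true) := by
  rw [is_uniq_cons, foldA_eq]

lemma is_uniq_alt_cons (h : Int) (t : List Int) :
    is_uniq_alt (h :: t) =
      (decide (PySem.List.count (h :: t) (t.foldl min h) = 1) &&
       decide (PySem.List.count (h :: t) (t.foldl max h) = 1)) := by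
  have : is_uniq_alt (h :: t) =
      (decide (PySem.List.count (h :: t)
        (List.foldl (fun (st : Int × Int) x =>
          ((if x < st.1 then x else st.1), (if x > st.2 then x else st.2))) (h, h) t).1 = 1) &&
       decide (PySem.List.count (h :: t)
        (List.foldl (fun (st : Int × Int) x =>
          ((if x < st.1 then x else st.1), (if x > st.2 then x else st.2))) (h, h) t).2 = 1)) := rfl
  rw [this, foldB_gen t h h]

-- ===== VERDICT (by name: the statement is the Claim_ definition above) =====
theorem is_uniq_spec : Claim_unchanged_is_uniq := by
  intro tab hdom hpre hnD
  rcases tab with _ | ⟨h, t⟩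
  · exact absurd rfl hpre
  rw [is_uniq_closed, is_uniq_alt_cons, PySem.List.count_eq, PySem.List.count_eq]
  have hmem_mx : t.foldl max h ∈ h :: t := by
    rcases PySem.List.foldl_max_mem t h with h1 | h1
    · rw [h1]; exact List.mem_cons_self
    · exact List.mem_cons_of_mem _ h1
  have hcmx : 1 ≤ List.count (t.foldl max h) (h :: t) := List.count_pos_iff.2 hmem_mx
  by_cases hmh : t.foldl min h = h
  · rw [hmh]
    unfold mcA
    rw [if_pos hmh]
    have hlb : ∀ y ∈ t, h ≤ y := by
      intro y hy
      have := (PySem.List.foldl_min_le t h).2 y hy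
      omega
    rcases t with _ | ⟨y, t'⟩
    · simp
    by_cases hyh : y = h
    · -- tab starts with a duplicated head: the region D_ describes; use ¬ D
      subst hyh
      rw [show List.dropWhile (· == y) (y :: t') = List.dropWhile (· == y) t' from by
        simp [List.dropWhile]]
      have hch2 : List.count y (y :: y :: t') = 2 + List.count y t' := by
        simp only [List.count_cons_self]; omega
      by_cases hzero : List.count y (List.dropWhile (· == y) t') = 0
      · by_cases hone : List.count ((y :: t').foldl max y) (y :: y :: t') = 1
        · exfalso
          apply hnD
          intro m hm
          rw [List.min?_cons'] at hm
          rw [Option.mem_def, Option.some.injEq] at hm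
          rw [← hm, hmh]
          have htw : (y :: y :: t').takeWhile (· == y) = y :: y :: t'.takeWhile (· == y) := by
            simp [List.takeWhile_cons]
          have hsplitc : List.count y t' =
              List.count y (t'.takeWhile (· == y)) + List.count y (t'.dropWhile (· == y)) := by
            conv_lhs => rw [← List.takeWhile_append_dropWhile (p := (· == y)) (l := t')]
            rw [List.count_append]
          refine ⟨by omega, ?_, ?_⟩
          · rw [htw]
            have hle' : List.count y (t'.takeWhile (· == y)) ≤ (t'.takeWhile (· == y)).length :=
              List.count_le_length
            simp only [List.length_cons]
            omega
          · intro M hM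
            rw [List.max?_cons'] at hM
            rw [Option.mem_def, Option.some.injEq] at hM
            rw [← hM]
            exact hone
        · -- the maximum is not unique: both programs return False
          split_ifs with hc
          · symm
            rw [Bool.and_eq_false_iff]
            right
            simp only [decide_eq_false_iff_not]
            omega
          · exfalso; apply hc; left; omega
      · -- a duplicate of the minimum after the run: both programs return False
        split_ifs with hc
        · symm
          rw [Bool.and_eq_false_iff]
          left
          simp only [decide_eq_false_iff_not]
          omega
        · exfalso; apply hc; right; omega
    · -- head of t differs from h: A's drop-while keeps all of t, counts agree
      have hbeq : (y == h) = false := by simpa using hyh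
      rw [show List.dropWhile (· == h) (y :: t') = y :: t' from by
        simp [List.dropWhile, hbeq]]
      have hch : List.count h (h :: y :: t') = 1 + List.count h (y :: t') := by
        simp only [List.count_cons_self]; omega
      split_ifs with hc
      · symm
        rw [Bool.and_eq_false_iff]
        simp only [decide_eq_false_iff_not]
        omega
      · symm
        rw [Bool.and_eq_true]
        simp only [decide_eq_true_eq]
        constructor <;> omega
  · -- minimum strictly below the first element: A's min counter is exact
    unfold mcA
    rw [if_neg hmh]
    have hmem_mn : t.foldl min h ∈ h :: t := by
      rcases PySem.List.foldl_min_mem t h with h1 | h1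
      · rw [h1]; exact List.mem_cons_self
      · exact List.mem_cons_of_mem _ h1
    have hcmn : 1 ≤ List.count (t.foldl min h) (h :: t) := List.count_pos_iff.2 hmem_mn
    split_ifs with hc
    · symm
      rw [Bool.and_eq_false_iff]
      simp only [decide_eq_false_iff_not]
      omega
    · symm
      rw [Bool.and_eq_true]
      simp only [decide_eq_true_eq]
      constructor <;> omega
theorem is_uniq_changed : Claim_changed_is_uniq := by
  unfold Claim_changed_is_uniq; decide
theorem is_uniq_tight : Claim_exact_is_uniq := by
  intro tab _ hpre hD
  rcases tab with _ | ⟨a, t⟩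
  · exact absurd rfl hpre
  obtain ⟨h2c, hcle, hMc⟩ := hD (t.foldl min a) (by rw [Option.mem_def, List.min?_cons'])
  have hM1 : List.count (t.foldl max a) (a :: t) = 1 :=
    hMc (t.foldl max a) (by rw [Option.mem_def, List.max?_cons'])
  have hmna : t.foldl min a = a := by
    by_contra hne
    have hnil : (a :: t).takeWhile (· == t.foldl min a) = [] := by
      rw [List.takeWhile_cons_of_neg]
      simp
      exact fun h => hne h.symm
    rw [hnil] at hcle
    simp at hcle
    have : t.foldl min a ∈ a :: t := by
      rcases PySem.List.foldl_min_mem t a with h1 | h1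
      · rw [h1]; exact List.mem_cons_self
      · exact List.mem_cons_of_mem _ h1
    have := List.count_pos_iff.2 this
    omega
  rw [hmna] at h2c hcle
  have htw : List.count a ((a :: t).takeWhile (· == a)) = ((a :: t).takeWhile (· == a)).length :=
    List.count_eq_length.2 (fun b hb => by
      have := List.mem_takeWhile_imp hb; simp at this; omega)
  have hsplit : List.count a (a :: t) =
      List.count a ((a :: t).takeWhile (· == a)) + List.count a ((a :: t).dropWhile (· == a)) := by
    conv_lhs => rw [← List.takeWhile_append_dropWhile (p := (· == a)) (l := a :: t)]
    rw [List.count_append]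
  have hdwt : (a :: t).dropWhile (· == a) = t.dropWhile (· == a) := by
    simp [List.dropWhile]
  have hdrop0 : List.count a (t.dropWhile (· == a)) = 0 := by
    rw [← hdwt]; omega
  have hmc : mcA a t = 1 := by
    unfold mcA
    rw [if_pos hmna, hdrop0]
    norm_num
  rw [is_uniq_closed, is_uniq_alt_cons, PySem.List.count_eq, PySem.List.count_eq,
    hmc, hM1, hmna]
  rw [if_neg (by norm_num)]
  intro hcontra
  have hc2 := hcontra.symm
  simp only [Bool.and_eq_true, decide_eq_true_eq] at hc2
  omega
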